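-- pv_equiv track=rewrite | github.com/logi-26/jba-challenge | parse_rain_data.py | _is_file_valid
-- ===== SOURCE A (Python) =====
-- def _is_file_valid(file_content_list):
-- 	years_present = False
-- 	grid_ref_present = False
--
-- 	# Loop through the rows to see if our required values are present in the precipitation data
-- 	for row in file_content_list:
-- 		if years_present and grid_ref_present:
-- 			break
-- 		if 'years' in row.lower():
-- 			years_present = True
-- 		if 'grid-ref=' in row.lower():
-- 			grid_ref_present = True
--
-- 	return years_present and grid_ref_present
-- ===== SOURCE B (Python) =====
-- def _is_file_valid(file_content_list):
-- 	return (any('years' in row.lower() for row in file_content_list)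
-- 		and any('grid-ref=' in row.lower() for row in file_content_list))
-- ===== Notes on version B (the rewrite author's own statement) =====
-- stated objective: idiomatic
-- what changed: Replaces the single loop maintaining two flags with early break by two independent short-circuited any() membership scans.
import Mathlib
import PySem

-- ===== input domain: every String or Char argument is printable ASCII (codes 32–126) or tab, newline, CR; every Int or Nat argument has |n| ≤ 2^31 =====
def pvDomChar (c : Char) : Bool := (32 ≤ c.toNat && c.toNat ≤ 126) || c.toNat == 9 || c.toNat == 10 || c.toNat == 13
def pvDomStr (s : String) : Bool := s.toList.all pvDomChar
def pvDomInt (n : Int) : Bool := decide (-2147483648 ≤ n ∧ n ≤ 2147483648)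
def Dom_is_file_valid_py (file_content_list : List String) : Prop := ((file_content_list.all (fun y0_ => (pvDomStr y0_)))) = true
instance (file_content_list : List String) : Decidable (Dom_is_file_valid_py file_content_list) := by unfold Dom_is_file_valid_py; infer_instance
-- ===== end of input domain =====

-- B replaces A's single two-flag loop with two independent any() scans (idiomatic; same cost).


-- ===== PORT A =====
-- loop of A: two flags with early break, recursion over the row list
def isFileValidLoop : List String → Bool → Bool → Bool
  | [], yp, gp => yp && gp
  | row :: rest, yp, gp =>
    if yp && gp then yp && gp
    else
      let yp' := if PySem.Str.isIn "years" (PySem.Str.lower row) then true else yp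
      let gp' := if PySem.Str.isIn "grid-ref=" (PySem.Str.lower row) then true else gp
      isFileValidLoop rest yp' gp'

def is_file_valid_py (file_content_list : List String) : Bool :=
  isFileValidLoop file_content_list false false

-- ===== PORT B =====
def is_file_valid_py_alt (file_content_list : List String) : Bool :=
  (file_content_list.any fun row => PySem.Str.isIn "years" (PySem.Str.lower row)) &&
  (file_content_list.any fun row => PySem.Str.isIn "grid-ref=" (PySem.Str.lower row))

-- ===== PRECONDITION & SPEC =====
def Spec_is_file_valid_py (file_content_list : List String) (out : Bool) : Prop := out = is_file_valid_py_alt file_content_list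
instance (file_content_list : List String) (out : Bool) : Decidable (Spec_is_file_valid_py file_content_list out) := by unfold Spec_is_file_valid_py; infer_instance

-- ===== CLAIM (what is proved, stated in full; the proofs are below) =====
def Claim_equal_is_file_valid_py : Prop := ∀ (file_content_list : List String), Dom_is_file_valid_py file_content_list → Spec_is_file_valid_py file_content_list (is_file_valid_py file_content_list)

-- ===== LEMMAS AND PROOFS =====

-- ===== VERDICT (by name: the statement is the Claim_ definition above) =====
lemma isFileValidLoop_eq (l : List String) (yp gp : Bool) :
    isFileValidLoop l yp gp =
      ((yp || l.any fun row => PySem.Str.isIn "years" (PySem.Str.lower row)) &&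
       (gp || l.any fun row => PySem.Str.isIn "grid-ref=" (PySem.Str.lower row))) := by
  induction l generalizing yp gp with
  | nil => simp [isFileValidLoop]
  | cons row rest ih =>
    simp only [isFileValidLoop, List.any_cons]
    by_cases h : (yp && gp) = true
    · simp at h
      simp [h]
    · simp [h, ih]
      cases hy : PySem.Str.isIn "years" (PySem.Str.lower row) <;>
        cases hg : PySem.Str.isIn "grid-ref=" (PySem.Str.lower row) <;>
        cases yp <;> cases gp <;> simp_all

theorem is_file_valid_py_spec : Claim_equal_is_file_valid_py := by
  intro l _
  unfold Spec_is_file_valid_py is_file_valid_py is_file_valid_py_alt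
  simp [isFileValidLoop_eq]
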